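-- pv_equiv track=rewrite | github.com/minghsu/usim_modifier_v3 | model/library/input_check.py | is_valid_adm_code
-- ===== SOURCE A (Python) =====
-- def is_valid_adm_code(arg_admcode):
--
--     if len(arg_admcode) != 16:
--         return False
--
--     admcode = arg_admcode.upper()
--     for i in range(len(admcode)):
--         if admcode[i] not in "0123456789ABCDEF":
--             return False
--
--     return True
-- ===== SOURCE B (Python) =====
-- def is_valid_adm_code(arg_admcode):
--     # Recursive-descent matcher for the pattern "exactly 16 hex digits":
--     # consume one character at a time with a remaining-count, arithmetic
--     # range tests for the character class; no len(), no upper(), no index loop.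
--     def match(s, remaining):
--         if not s:
--             return remaining == 0
--         if remaining == 0:
--             return False
--         c = s[0]
--         if not ('0' <= c <= '9' or 'A' <= c <= 'F' or 'a' <= c <= 'f'):
--             return False
--         return match(s[1:], remaining - 1)
--     return match(arg_admcode, 16)
-- ===== Notes on version B (the rewrite author's own statement) =====
-- stated objective: alternative
-- what changed: Replaces the up-front length check, upper-casing and per-index membership loop by a recursive-descent matcher that consumes one character at a time with a remaining-count of 16 and arithmetic code-point range tests for the character class.
import Mathlib
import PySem

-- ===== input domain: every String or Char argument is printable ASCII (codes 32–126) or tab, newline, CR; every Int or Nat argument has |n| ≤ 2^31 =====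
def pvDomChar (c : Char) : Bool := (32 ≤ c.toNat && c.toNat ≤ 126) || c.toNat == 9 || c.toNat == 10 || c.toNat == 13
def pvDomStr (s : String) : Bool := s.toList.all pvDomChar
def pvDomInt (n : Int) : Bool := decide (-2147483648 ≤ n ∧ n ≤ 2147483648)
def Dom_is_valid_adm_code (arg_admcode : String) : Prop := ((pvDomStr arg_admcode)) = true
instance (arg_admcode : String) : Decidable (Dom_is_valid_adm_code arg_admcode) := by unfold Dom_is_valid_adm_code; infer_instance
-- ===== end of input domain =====

-- B replaces A's length guard + upper-casing + per-index membership loop by a recursive-descent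
-- matcher consuming one character at a time with a remaining-count and arithmetic range tests (alternative; same cost).


-- ===== PORT A =====
-- the for-loop over range(len(admcode)) with early 'return False'
def pvALoop (adm : List Char) : List Int → Bool
  | [] => true
  | i :: rest =>
    if !("0123456789ABCDEF".toList.contains (PySem.List.pyGetD adm i ' ')) then false
    else pvALoop adm rest

def is_valid_adm_code (arg_admcode : String) : Bool :=
  if PySem.Str.len arg_admcode ≠ 16 then false
  else
    let admcode := PySem.Str.upper arg_admcode
    pvALoop admcode.toList (PySem.List.pyRange 0 (PySem.Str.len admcode) 1)

-- ===== PORT B =====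
-- Source B's inner 'match(s, remaining)': structural recursion on the string, Int counter
def pvMatch : List Char → Int → Bool
  | [], r => r == 0
  | c :: rest, r =>
    if r == 0 then false
    else if !(('0' ≤ c && c ≤ '9') || ('A' ≤ c && c ≤ 'F') || ('a' ≤ c && c ≤ 'f')) then false
    else pvMatch rest (r - 1)

def is_valid_adm_code_alt (arg_admcode : String) : Bool :=
  pvMatch arg_admcode.toList 16

-- ===== PRECONDITION & SPEC =====
def Spec_is_valid_adm_code (arg_admcode : String) (out : Bool) : Prop := out = is_valid_adm_code_alt arg_admcode
instance (arg_admcode : String) (out : Bool) : Decidable (Spec_is_valid_adm_code arg_admcode out) := by unfold Spec_is_valid_adm_code; infer_instance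

-- ===== CLAIM (what is proved, stated in full; the proofs are below) =====
def Claim_equal_is_valid_adm_code : Prop := ∀ (arg_admcode : String), Dom_is_valid_adm_code arg_admcode → Spec_is_valid_adm_code arg_admcode (is_valid_adm_code arg_admcode)

-- ===== LEMMAS AND PROOFS =====

-- A's loop over any index list is an 'all' of the membership test
theorem pvALoop_eq_all (adm : List Char) (l : List Int) :
    pvALoop adm l = l.all (fun i => "0123456789ABCDEF".toList.contains (PySem.List.pyGetD adm i ' ')) := by
  induction l with
  | nil => rfl
  | cons i rest ih =>
    simp only [pvALoop, List.all_cons]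
    by_cases h : "0123456789ABCDEF".toList.contains (PySem.List.pyGetD adm i ' ') = true <;>
      simp [ih]

-- B's matcher accepts exactly the strings of length k all of whose characters pass its class test
theorem pvMatch_eq (l : List Char) (k : Nat) :
    pvMatch l (k : Int)
      = (decide (l.length = k) &&
          l.all (fun c => ('0' ≤ c && c ≤ '9') || ('A' ≤ c && c ≤ 'F') || ('a' ≤ c && c ≤ 'f'))) := by
  induction l generalizing k with
  | nil => cases k <;> simp [pvMatch] <;> omega
  | cons c rest ih =>
    rcases k with _ | m
    · simp [pvMatch]
    · have h1 : (((m + 1 : Nat) : Int) == 0) = false := by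
        simp only [beq_eq_false_iff_ne, ne_eq]; push_cast; omega
      have h2 : ((m + 1 : Nat) : Int) - 1 = (m : Int) := by push_cast; ring
      simp only [pvMatch, h1, h2, ih]
      by_cases hc : (('0' ≤ c && c ≤ '9') || ('A' ≤ c && c ≤ 'F') || ('a' ≤ c && c ≤ 'f')) = true <;>
        · simp [hc, List.length_cons]
          try omega

-- per printable-ASCII character: upper(c) is an upper-case hex digit iff c passes B's range tests
set_option maxRecDepth 8192 in
theorem pvHexChar (c : Char) (h : pvDomChar c = true) :
    ("0123456789ABCDEF".toList.contains (PySem.Chars.upperChar c))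
      = (('0' ≤ c && c ≤ '9') || ('A' ≤ c && c ≤ 'F') || ('a' ≤ c && c ≤ 'f')) := by
  have hb : c.toNat < 127 := by
    simp only [pvDomChar, Bool.or_eq_true, Bool.and_eq_true, decide_eq_true_eq, beq_iff_eq] at h
    omega
  have key : ∀ n : Nat, n < 127 →
      ("0123456789ABCDEF".toList.contains (PySem.Chars.upperChar (Char.ofNat n))
        = (('0' ≤ (Char.ofNat n) && (Char.ofNat n) ≤ '9') || ('A' ≤ (Char.ofNat n) && (Char.ofNat n) ≤ 'F')
            || ('a' ≤ (Char.ofNat n) && (Char.ofNat n) ≤ 'f'))) := by decide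
  have := key c.toNat hb
  rwa [Char.ofNat_toNat] at this

theorem is_valid_adm_code_spec : Claim_equal_is_valid_adm_code := by
  intro s hDom
  unfold Spec_is_valid_adm_code is_valid_adm_code is_valid_adm_code_alt
  have hdom' : ∀ c ∈ s.toList, pvDomChar c = true := by
    have := hDom; unfold Dom_is_valid_adm_code pvDomStr at this
    simpa [List.all_eq_true] using this
  have hB := pvMatch_eq s.toList 16
  rw [show (((16 : Nat) : Int)) = (16 : Int) by norm_num] at hB
  rw [hB]
  by_cases hlen : PySem.Str.len s = 16
  · simp only [hlen, ne_eq, not_true_eq_false, if_false]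
    have hlenN : s.toList.length = 16 := by
      have := hlen; rw [PySem.Str.len_eq] at this; exact_mod_cast this
    rw [pvALoop_eq_all]
    have hlist : (PySem.Str.upper s).toList = (s.toList).map PySem.Chars.upperChar := by
      simp [PySem.Str.upper, PySem.Chars.upper]
    have hlenu : PySem.Str.len (PySem.Str.upper s) = ((PySem.Str.upper s).toList.length : Int) := by
      simp [PySem.Str.len_eq]
    rw [hlenu]
    have h1 : (PySem.List.pyRange 0 ((PySem.Str.upper s).toList.length : Int) 1).all
          (fun i => "0123456789ABCDEF".toList.contains
            (PySem.List.pyGetD (PySem.Str.upper s).toList i ' '))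
        = ((PySem.List.pyRange 0 ((PySem.Str.upper s).toList.length : Int) 1).map
            (fun i => PySem.List.pyGetD (PySem.Str.upper s).toList i ' ')).all
            (fun c => "0123456789ABCDEF".toList.contains c) := by
      simp only [List.all_map]; rfl
    rw [h1, PySem.List.map_pyGetD_pyRange_zero', hlist]
    have h2 : ((s.toList.map PySem.Chars.upperChar).all
          (fun c => "0123456789ABCDEF".toList.contains c))
        = s.toList.all (fun c => "0123456789ABCDEF".toList.contains (PySem.Chars.upperChar c)) := by
      simp only [List.all_map]; rfl
    rw [h2]
    have h3 : s.toList.all (fun c => "0123456789ABCDEF".toList.contains (PySem.Chars.upperChar c))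
        = s.toList.all (fun c => ('0' ≤ c && c ≤ '9') || ('A' ≤ c && c ≤ 'F') || ('a' ≤ c && c ≤ 'f')) := by
      rw [Bool.eq_iff_iff, List.all_eq_true, List.all_eq_true]
      constructor
      · intro H c hc; rw [← pvHexChar c (hdom' c hc)]; exact H c hc
      · intro H c hc; rw [pvHexChar c (hdom' c hc)]; exact H c hc
    rw [h3, hlenN]
    simp
  · have hlenN : s.toList.length ≠ 16 := by
      intro h; apply hlen; rw [PySem.Str.len_eq]; exact_mod_cast h
    rw [if_pos hlen]
    have hl2 : s.length ≠ 16 := by simpa using hlenN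
    simp [hl2]
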